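-- pv_equiv track=rewrite | github.com/Mushahid2521/Data-Structures-and-Algorithms-in-Python | Interview Questions/Time To Type String.py | solve
-- ===== SOURCE A (Python) =====
-- def solve(keyboard, word):
--     sequence = [0]*(26)
--
--     for i in range(len(keyboard)):
--         sequence[ord(keyboard[i])-ord('a')] = i
--
--     time = 0
--     now = keyboard[0]
--     for i in range(len(word)):
--         time+=abs(sequence[ord(word[i])-ord('a')]-sequence[ord(now)-ord('a')])
--         now  = word[i]
--
--     return time
-- ===== SOURCE B (Python) =====
-- def solve(keyboard, word):
--     positions = {c: i for i, c in enumerate(keyboard)}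
--     path = [positions.get(c, 0) for c in keyboard[0] + word]
--     steps = list(zip(path, path[1:]))
--     total = 0
--     for k in range(len(keyboard) - 1):
--         # count the moves that cross the gap between slot k and slot k+1
--         total += sum(1 for a, b in steps if min(a, b) <= k < max(a, b))
--     return total
-- ===== Notes on version B (the rewrite author's own statement) =====
-- stated objective: alternative
-- what changed: A sums absolute position differences in one fused pass with a running 'now' char and a 26-slot array; B resolves the path of positions once and then, for each gap between adjacent keyboard slots, counts how many moves cross that gap, summing the crossing counts (sum of |b-a| = sum over unit gaps of crossings).
-- outside the precondition, e.g. on solve('Ga', 'aG'): A returns 0, B returns 2; on solve('ab', 'H'): A returns 1, B returns 0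
import Mathlib
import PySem

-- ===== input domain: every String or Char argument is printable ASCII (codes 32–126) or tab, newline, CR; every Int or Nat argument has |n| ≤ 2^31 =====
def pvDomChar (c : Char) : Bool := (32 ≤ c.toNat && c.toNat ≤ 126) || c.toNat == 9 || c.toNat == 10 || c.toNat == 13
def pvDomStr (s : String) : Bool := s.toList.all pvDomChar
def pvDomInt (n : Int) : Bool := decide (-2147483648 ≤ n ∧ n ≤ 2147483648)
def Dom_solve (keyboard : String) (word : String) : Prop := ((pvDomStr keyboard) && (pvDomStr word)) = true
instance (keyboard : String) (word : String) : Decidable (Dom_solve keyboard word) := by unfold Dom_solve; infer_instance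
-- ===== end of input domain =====

-- B replaces A's fused abs-difference accumulation with a staged algorithm: resolve the path of
-- positions once, then count for each unit gap between adjacent keyboard slots how many moves
-- cross it, summing the crossing counts (objective: alternative; O(|keyboard|*|word|), not faster).


-- ===== PORT A =====
def solve (keyboard : String) (word : String) : Int :=
  let kb := keyboard.toList
  let w := word.toList
  -- sequence = [0]*26
  let sequence : List Int := PySem.List.pyRepeat [(0 : Int)] 26
  -- for i in range(len(keyboard)): sequence[ord(keyboard[i])-ord('a')] = i
  -- (pySetD/pyGetD are the total forms; the raising indices are outside Pre_solve)
  let sequence :=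
    (PySem.List.pyRange 0 (kb.length : Int) 1).foldl
      (fun s i => PySem.List.pySetD s (((PySem.List.pyGetD kb i ' ').toNat : Int) - 97) i)
      sequence
  -- now = keyboard[0]  (IndexError on empty keyboard: outside Pre_solve)
  let now : Char := PySem.List.pyGetD kb 0 ' '
  -- for i in range(len(word)): time += abs(sequence[ord(word[i])-97] - sequence[ord(now)-97]); now = word[i]
  let r :=
    (PySem.List.pyRange 0 (w.length : Int) 1).foldl
      (fun (st : Int × Char) i =>
        let c := PySem.List.pyGetD w i ' '
        (st.1 + |PySem.List.pyGetD sequence ((c.toNat : Int) - 97) 0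
               - PySem.List.pyGetD sequence ((st.2.toNat : Int) - 97) 0|, c))
      ((0 : Int), now)
  r.1

-- ===== PORT B =====
def solve_alt (keyboard : String) (word : String) : Int :=
  -- positions = {c: i for i, c in enumerate(keyboard)}
  let positions : PySem.Dict Char Int :=
    (PySem.List.enumerate keyboard.toList 0).foldl
      (fun d p => PySem.Dict.insert d p.2 p.1) PySem.Dict.empty
  -- path = [positions.get(c, 0) for c in keyboard[0] + word]
  -- (keyboard[0] on an empty keyboard — IndexError — is outside Pre_solve)
  let path : List Int :=
    (PySem.List.slice keyboard.toList none (some 1) ++ word.toList).map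
      (fun c => (PySem.Dict.get? positions c).getD 0)
  -- steps = list(zip(path, path[1:]))
  let steps : List (Int × Int) := path.zip path.tail
  -- for k in range(len(keyboard) - 1): total += sum(1 for a, b in steps if min(a,b) <= k < max(a,b))
  (PySem.List.pyRange 0 ((keyboard.toList.length : Int) - 1) 1).foldl
    (fun tot k =>
      tot + steps.foldl
        (fun acc p => acc + (if min p.1 p.2 ≤ k ∧ k < max p.1 p.2 then (1 : Int) else 0)) 0)
    0

-- ===== PRECONDITION & SPEC =====
-- Pre_solve: nonempty keyboard, every character (keyboard and word) with code in [71,122] (so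
-- A's index ord(c)-97 lies in [-26,25] and does not raise IndexError; codes in [71,96] reach the
-- array by Python's negative-index wraparound), and no character colliding modulo 26 with a
-- distinct keyboard character (on such a collision A's wraparound writes/reads the wrong slot
-- while B keys the dict by the actual character).  Outside Pre_solve A raises IndexError (empty
-- keyboard, or a code outside [71,122]) or returns such an accidental colliding-slot value.
def pvKeyChar (c : Char) : Bool := 71 ≤ c.toNat && c.toNat ≤ 122
def pvSlot (c : Char) : Nat := (c.toNat - 71) % 26
def Pre_solve (keyboard : String) (word : String) : Prop :=
  keyboard.toList ≠ [] ∧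
  (keyboard.toList ++ word.toList).all pvKeyChar = true ∧
  (keyboard.toList ++ word.toList).all (fun c => keyboard.toList.all
    (fun d => c == d || pvSlot c != pvSlot d)) = true
instance (keyboard : String) (word : String) : Decidable (Pre_solve keyboard word) := by
  unfold Pre_solve; infer_instance

def pvWitness_solve : String × String := ("abc", "cab")

def Spec_solve (keyboard : String) (word : String) (out : Int) : Prop := out = solve_alt keyboard word
instance (keyboard : String) (word : String) (out : Int) : Decidable (Spec_solve keyboard word out) := by
  unfold Spec_solve; infer_instance

-- ===== CLAIM (what is proved, stated in full; the proofs are below) =====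
def Claim_equal_solve : Prop := ∀ (keyboard : String) (word : String), Dom_solve keyboard word → Pre_solve keyboard word → Spec_solve keyboard word (solve keyboard word)

-- ===== LEMMAS AND PROOFS =====

-- a character is 'good' w.r.t. the keyboard list KB: in A's reachable code range, and no other
-- keyboard character shares its (wrapped) array slot
def pvGood (KB : List Char) (c : Char) : Prop :=
  (71 ≤ c.toNat ∧ c.toNat ≤ 122) ∧ ∀ x ∈ KB, pvSlot x = pvSlot c → x = c

-- A's index ord(c)-97 (negative codes wrapping) addresses physical slot pvSlot c of the 26-array
theorem pv_pyIdx_slot (c : Char) (h1 : 71 ≤ c.toNat) (h2 : c.toNat ≤ 122) :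
    PySem.List.pyIdx? 26 ((c.toNat : Int) - 97) = some (pvSlot c) := by
  unfold PySem.List.pyIdx? pvSlot
  rcases le_or_gt 97 c.toNat with h | h
  · rw [if_pos (by omega), if_pos (by omega)]
    congr 1
    omega
  · rw [if_neg (by omega), if_pos (by omega)]
    congr 1
    omega

theorem pv_pyGetD_slot (seq : List Int) (hlen : seq.length = 26) (c : Char)
    (h1 : 71 ≤ c.toNat) (h2 : c.toNat ≤ 122) :
    PySem.List.pyGetD seq ((c.toNat : Int) - 97) 0 = seq.getD (pvSlot c) 0 := by
  unfold PySem.List.pyGetD PySem.List.pyGet?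
  rw [hlen, pv_pyIdx_slot c h1 h2]
  simp [List.getD]

theorem pv_pySetD_slot (seq : List Int) (hlen : seq.length = 26) (c : Char)
    (h1 : 71 ≤ c.toNat) (h2 : c.toNat ≤ 122) (v : Int) :
    PySem.List.pySetD seq ((c.toNat : Int) - 97) v = seq.set (pvSlot c) v := by
  unfold PySem.List.pySetD PySem.List.pySet?
  rw [hlen, pv_pyIdx_slot c h1 h2]
  rfl

theorem pv_slot_lt (c : Char) : pvSlot c < 26 := Nat.mod_lt _ (by omega)

-- the invariant tying A's 26-slot array to B's dict: lookups of 'good' characters agree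
theorem pv_lookup_inv (KB : List Char) (hKB : ∀ c ∈ KB, 71 ≤ c.toNat ∧ c.toNat ≤ 122) :
    ∀ (kb : List Char), (∀ x ∈ kb, x ∈ KB) →
    ∀ (s : Int) (seq : List Int) (d : PySem.Dict Char Int),
    seq.length = 26 →
    (∀ c : Char, pvGood KB c → seq.getD (pvSlot c) 0 = (PySem.Dict.get? d c).getD 0) →
    ∀ c : Char, pvGood KB c →
      PySem.List.pyGetD
        ((PySem.List.enumerate kb s).foldl
          (fun t p => PySem.List.pySetD t ((p.2.toNat : Int) - 97) p.1) seq)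
        ((c.toNat : Int) - 97) 0
      = (PySem.Dict.get?
          ((PySem.List.enumerate kb s).foldl (fun d p => PySem.Dict.insert d p.2 p.1) d) c).getD 0 := by
  intro kb
  induction kb with
  | nil =>
    intro _ s seq d hlen hinv c hc
    rw [PySem.List.enumerate]
    simp only [List.foldl_nil]
    rw [pv_pyGetD_slot seq hlen c hc.1.1 hc.1.2]
    exact hinv c hc
  | cons x kb ih =>
    intro hsub s seq d hlen hinv c hc
    obtain ⟨hx1, hx2⟩ := hKB x (hsub x (List.mem_cons_self ..))
    rw [PySem.List.enumerate_cons]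
    simp only [List.foldl_cons]
    rw [pv_pySetD_slot seq hlen x hx1 hx2]
    refine ih (fun y hy => hsub y (List.mem_cons_of_mem _ hy)) (s + 1) _ _ ?_ ?_ c hc
    · simpa using hlen
    · intro c' hc'
      rw [PySem.Dict.get?_insert]
      by_cases hq : c' = x
      · subst hq
        rw [if_pos rfl, List.getD_eq_getElem?_getD, List.getElem?_set_self
            (by rw [hlen]; exact pv_slot_lt c')]
      · have hsne : pvSlot c' ≠ pvSlot x := by
          intro he
          exact hq ((hc'.2 x (hsub x (List.mem_cons_self ..)) he.symm).symm)
        rw [if_neg hq, List.getD_eq_getElem?_getD, List.getElem?_set_ne (by omega),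
            ← List.getD_eq_getElem?_getD]
        exact hinv c' hc'

-- the fresh 26-slot array and the empty dict agree on every lookup
theorem pv_init_inv (c : Char) :
    (List.replicate 26 (0 : Int)).getD (pvSlot c) 0
      = ((PySem.Dict.empty : PySem.Dict Char Int).get? c).getD 0 := by
  rw [List.getD_replicate _ (pv_slot_lt c)]
  simp

-- replacing the lookup function in A's fused word loop (P-pointwise-equal lookups)
theorem pv_fused_congr (P : Char → Prop) (fA fB : Char → Int)
    (hfg : ∀ c : Char, P c → fA c = fB c) :
    ∀ (w : List Char), (∀ c ∈ w, P c) →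
    ∀ (n0 : Char), P n0 → ∀ (t0 : Int),
    (w.foldl (fun (st : Int × Char) c => (st.1 + |fA c - fA st.2|, c)) (t0, n0))
  = (w.foldl (fun (st : Int × Char) c => (st.1 + |fB c - fB st.2|, c)) (t0, n0)) := by
  intro w
  induction w with
  | nil => intros; rfl
  | cons c w ih =>
    intro hw n0 h0 t0
    simp only [List.foldl_cons]
    have hc := hw c (List.mem_cons_self ..)
    rw [hfg c hc, hfg n0 h0]
    exact ih (fun d hd => hw d (List.mem_cons_of_mem _ hd)) c hc _

-- A's fused accumulate-as-you-go loop computes the pairwise abs-sum over consecutive positions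
theorem pv_fused_eq_pairsum (f : Char → Int) (w : List Char) :
    ∀ (n0 : Char) (t0 : Int),
    (w.foldl (fun (st : Int × Char) c => (st.1 + |f c - f st.2|, c)) (t0, n0)).1
  = ((((n0 :: w).map f).zip (((n0 :: w).map f).tail)).foldl
      (fun acc p => acc + |p.2 - p.1|) t0) := by
  induction w with
  | nil => intro n0 t0; simp
  | cons c w ih =>
    intro n0 t0
    simp only [List.foldl_cons, List.map_cons, List.tail_cons, List.zip_cons_cons]
    exact ih c (t0 + |f c - f n0|)

-- A's index-loop over the keyboard, phrased over enumerate
theorem pv_foldA_eq (kb : List Char) (seq0 : List Int) :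
    (PySem.List.pyRange 0 (kb.length : Int) 1).foldl
      (fun s i => PySem.List.pySetD s (((PySem.List.pyGetD kb i ' ').toNat : Int) - 97) i) seq0
  = (PySem.List.enumerate kb 0).foldl
      (fun t p => PySem.List.pySetD t ((p.2.toNat : Int) - 97) p.1) seq0 := by
  have h := PySem.List.enumerate_eq_map_pyRange kb ' '
  rw [h, List.foldl_map]
  simp [PySem.List.len]

-- all values stored by B's dict fold lie in [0, bound]
theorem pv_dict_bound (bound : Int) :
    ∀ (kb : List Char) (s : Int) (d : PySem.Dict Char Int),
    0 ≤ s → s + kb.length - 1 ≤ bound →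
    (∀ c : Char, 0 ≤ ((PySem.Dict.get? d c).getD 0) ∧ ((PySem.Dict.get? d c).getD 0) ≤ bound) →
    ∀ c : Char,
      0 ≤ ((PySem.Dict.get?
            ((PySem.List.enumerate kb s).foldl (fun d p => PySem.Dict.insert d p.2 p.1) d) c).getD 0)
    ∧ ((PySem.Dict.get?
            ((PySem.List.enumerate kb s).foldl (fun d p => PySem.Dict.insert d p.2 p.1) d) c).getD 0) ≤ bound := by
  intro kb
  induction kb with
  | nil =>
    intro s d _ _ hd c
    rw [PySem.List.enumerate]
    simpa using hd c
  | cons x kb ih =>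
    intro s d hs hb hd c
    rw [PySem.List.enumerate_cons]
    simp only [List.foldl_cons]
    refine ih (s + 1) _ (by omega) (by simp only [List.length_cons] at hb; push_cast at hb ⊢; omega) ?_ c
    intro c'
    rw [PySem.Dict.get?_insert]
    by_cases hq : c' = x
    · rw [if_pos hq]
      simp only [Option.getD_some]
      constructor
      · exact hs
      · have : (0 : Int) ≤ kb.length := Int.natCast_nonneg _
        simp at hb
        omega
    · rw [if_neg hq]
      exact hd c'

-- counting the k in range(n) with lo ≤ k < hi (Int bounds, lo ≥ 0)
theorem pv_ind_sum (lo hi : Int) (h0 : 0 ≤ lo) :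
    ∀ (n : Nat),
    ((PySem.List.pyRange 0 (n : Int) 1).map
      (fun k => if lo ≤ k ∧ k < hi then (1 : Int) else 0)).sum
     = max 0 (min hi (n : Int) - lo) := by
  intro n
  induction n with
  | zero =>
    rw [PySem.List.pyRange_one_eq_nil (by omega)]
    simp
    omega
  | succ n ih =>
    have : ((n + 1 : Nat) : Int) = (n : Int) + 1 := by push_cast; ring
    rw [this, PySem.List.pyRange_one_succ_right (by omega), List.map_append, List.sum_append, ih]
    simp only [List.map_cons, List.map_nil, List.sum_cons, List.sum_nil]
    split_ifs with h
    · omega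
    · omega

-- swapping a double sum: sum over gaps of sum over steps = sum over steps of sum over gaps
theorem pv_sum_swap (ks : List Int) (ps : List (Int × Int)) (f : Int × Int → Int → Int) :
    (ks.map (fun k => (ps.map (fun p => f p k)).sum)).sum
  = (ps.map (fun p => (ks.map (fun k => f p k)).sum)).sum := by
  induction ks with
  | nil => simp
  | cons k ks ih =>
    simp only [List.map_cons, List.sum_cons, ih, PySem.List.sum_map_add_int]

-- the pairwise abs-sum over a path bounded by [0, L-1] equals the gap-crossing count sum
theorem pv_pairsum_eq_cross (L : Nat) (hL : 1 ≤ L) (path : List Int)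
    (hb : ∀ x ∈ path, 0 ≤ x ∧ x ≤ (L : Int) - 1) :
    ((path.zip path.tail).foldl (fun acc p => acc + |p.2 - p.1|) 0)
  = (PySem.List.pyRange 0 ((L : Int) - 1) 1).foldl
      (fun tot k =>
        tot + (path.zip path.tail).foldl
          (fun acc p => acc + (if min p.1 p.2 ≤ k ∧ k < max p.1 p.2 then (1 : Int) else 0)) 0)
      0 := by
  have hmem : ∀ p ∈ path.zip path.tail, (0 ≤ p.1 ∧ p.1 ≤ (L : Int) - 1) ∧
      (0 ≤ p.2 ∧ p.2 ≤ (L : Int) - 1) := by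
    intro p hp
    have h1 := List.of_mem_zip hp
    exact ⟨hb p.1 h1.1, hb p.2 (List.mem_of_mem_tail h1.2)⟩
  have hcast : ((L : Int) - 1) = ((L - 1 : Nat) : Int) := by omega
  rw [PySem.List.foldl_add (path.zip path.tail) (fun p => |p.2 - p.1|) 0,
      PySem.List.foldl_add (PySem.List.pyRange 0 ((L : Int) - 1) 1) _ 0]
  simp only [zero_add]
  -- rewrite each inner loop as a sum, then swap the two sums
  have hinner : ∀ k : Int,
      ((path.zip path.tail).foldl
        (fun acc p => acc + (if min p.1 p.2 ≤ k ∧ k < max p.1 p.2 then (1 : Int) else 0)) 0)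
    = ((path.zip path.tail).map
        (fun p => if min p.1 p.2 ≤ k ∧ k < max p.1 p.2 then (1 : Int) else 0)).sum := by
    intro k
    rw [PySem.List.foldl_add (path.zip path.tail) _ 0, zero_add]
  simp only [hinner]
  rw [pv_sum_swap (PySem.List.pyRange 0 ((L : Int) - 1) 1) (path.zip path.tail)
      (fun p k => if min p.1 p.2 ≤ k ∧ k < max p.1 p.2 then (1 : Int) else 0)]
  congr 1
  refine List.map_congr_left ?_
  intro p hp
  obtain ⟨⟨h1a, h1b⟩, ⟨h2a, h2b⟩⟩ := hmem p hp
  rw [hcast, pv_ind_sum (min p.1 p.2) (max p.1 p.2) (by omega) (L - 1)]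
  rw [← hcast]
  rcases le_total p.1 p.2 with h | h
  · rw [abs_of_nonneg (by omega)]; omega
  · rw [abs_of_nonpos (by omega)]; omega

-- ===== VERDICT (by name: the statement is the Claim_ definition above) =====
set_option maxHeartbeats 2000000 in
theorem solve_spec : Claim_equal_solve := by
  intro keyboard word hdom hpre
  obtain ⟨hne, hrange0, hinj0⟩ := hpre
  have hkb : ∀ c ∈ keyboard.toList, 71 ≤ c.toNat ∧ c.toNat ≤ 122 := by
    intro c hc
    have := List.all_eq_true.mp hrange0 c (List.mem_append_left _ hc)
    simpa [pvKeyChar] using this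
  have hgood : ∀ c ∈ keyboard.toList ++ word.toList, pvGood keyboard.toList c := by
    intro c hc
    have hr := List.all_eq_true.mp hrange0 c hc
    refine ⟨by simpa [pvKeyChar] using hr, fun x hx hs => ?_⟩
    have := List.all_eq_true.mp (List.all_eq_true.mp hinj0 c hc) x hx
    simp only [Bool.or_eq_true, beq_iff_eq, bne_iff_ne, ne_eq] at this
    rcases this with h | h
    · exact h.symm
    · exact absurd hs.symm h
  obtain ⟨k, rest, hkbeq⟩ : ∃ k rest, keyboard.toList = k :: rest := by
    cases h : keyboard.toList with
    | nil => exact absurd h hne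
    | cons a l => exact ⟨a, l, rfl⟩
  unfold Spec_solve solve solve_alt
  simp only [PySem.List.pyRepeat_singleton, pv_foldA_eq, hkbeq]
  rw [PySem.List.foldl_pyRange_zero_pyGetD' word.toList ' '
      (fun (st : Int × Char) c => (st.1 + |PySem.List.pyGetD _ ((c.toNat : Int) - 97) 0
               - PySem.List.pyGetD _ ((st.2.toNat : Int) - 97) 0|, c))]
  rw [hkbeq] at hgood
  have hk0 : PySem.List.pyGetD (k :: rest) (0 : Int) ' ' = k := by
    simp
  rw [hk0]
  -- name the two big folds so the remaining steps are syntactic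
  set seqF := (PySem.List.enumerate (k :: rest) 0).foldl
      (fun t p => PySem.List.pySetD t ((p.2.toNat : Int) - 97) p.1)
      (List.replicate 26 (0 : Int)) with hseqF
  set dictF := (PySem.List.enumerate (k :: rest) 0).foldl
      (fun d p => PySem.Dict.insert d p.2 p.1) PySem.Dict.empty with hdictF
  have hfg : ∀ c : Char, pvGood (k :: rest) c →
      PySem.List.pyGetD seqF ((c.toNat : Int) - 97) 0
      = (PySem.Dict.get? dictF c).getD 0 := by
    intro c hc
    rw [hseqF, hdictF]
    exact pv_lookup_inv (k :: rest) (by rw [← hkbeq]; exact hkb) (k :: rest) (fun x hx => hx)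
      0 (List.replicate 26 0) PySem.Dict.empty (by simp)
      (fun c _ => pv_init_inv c) c hc
  have hbound : ∀ x ∈ (k :: word.toList).map
      (fun c : Char => (PySem.Dict.get? dictF c).getD 0),
      0 ≤ x ∧ x ≤ ((rest.length + 1 : Nat) : Int) - 1 := by
    intro x hx
    obtain ⟨c, _, rfl⟩ := List.mem_map.mp hx
    rw [hdictF]
    refine pv_dict_bound (((rest.length + 1 : Nat) : Int) - 1) (k :: rest) 0
      PySem.Dict.empty (le_refl 0) ?_ ?_ c
    · simp only [List.length_cons]
      omega
    · intro c'
      have h0 : ((PySem.Dict.empty : PySem.Dict Char Int).get? c').getD 0 = (0 : Int) := by simp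
      rw [h0]
      omega
  have hsl : PySem.List.slice (k :: rest) none (some 1) = [k] := by
    simp [PySem.List.slice_to]
  rw [hsl]
  simp only [List.singleton_append, List.length_cons]
  calc (word.toList.foldl
          (fun (st : Int × Char) c =>
            (st.1 + |PySem.List.pyGetD seqF ((c.toNat : Int) - 97) 0
                   - PySem.List.pyGetD seqF ((st.2.toNat : Int) - 97) 0|, c)) ((0 : Int), k)).1
      = (word.toList.foldl
          (fun (st : Int × Char) c =>
            (st.1 + |(PySem.Dict.get? dictF c).getD 0
                   - (PySem.Dict.get? dictF st.2).getD 0|, c)) ((0 : Int), k)).1 :=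
        congrArg Prod.fst (pv_fused_congr (pvGood (k :: rest))
          (fun c => PySem.List.pyGetD seqF ((c.toNat : Int) - 97) 0)
          (fun c => (PySem.Dict.get? dictF c).getD 0)
          hfg word.toList (fun c hc => hgood c (List.mem_append_right _ hc)) k
          (hgood k (List.mem_append_left _ (List.mem_cons_self ..))) 0)
    _ = ((((k :: word.toList).map (fun c => (PySem.Dict.get? dictF c).getD 0)).zip
          (((k :: word.toList).map (fun c => (PySem.Dict.get? dictF c).getD 0)).tail)).foldl
          (fun acc p => acc + |p.2 - p.1|) 0) :=
        pv_fused_eq_pairsum (fun c => (PySem.Dict.get? dictF c).getD 0) word.toList k 0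
    _ = (PySem.List.pyRange 0 (((rest.length + 1 : Nat) : Int) - 1) 1).foldl
          (fun tot k' =>
            tot + ((((k :: word.toList).map (fun c => (PySem.Dict.get? dictF c).getD 0)).zip
                (((k :: word.toList).map (fun c => (PySem.Dict.get? dictF c).getD 0)).tail)).foldl
              (fun acc p => acc + (if min p.1 p.2 ≤ k' ∧ k' < max p.1 p.2 then (1 : Int) else 0)) 0)) 0 :=
        pv_pairsum_eq_cross (rest.length + 1) (by omega)
          ((k :: word.toList).map (fun c => (PySem.Dict.get? dictF c).getD 0)) hbound
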